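-- pv_equiv track=rewrite | github.com/ybracke/textalign | src/textalign/docsplit.py | _get_offset2tokidx
-- ===== SOURCE A (Python) =====
-- from typing import Callable, Dict, Generator, List, Optional, Tuple
--
-- def _get_offset2tokidx(doc: List[str]) -> Dict[int, int]:
--     """
--     Create a mapping from a tokenized document: character offset -> token index
--
--     """
--     mapping = {}
--     idx = 0
--     offset = 0
--     for token in doc:
--         mapping[offset] = idx
--         offset += len(token)
--         idx += 1
--
--     return mapping
-- ===== SOURCE B (Python) =====
-- def _get_offset2tokidx(doc):
--     # divide & conquer: compute each half's (relative offset -> token index)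
--     # pairs recursively, shift the right half's offsets by the left half's
--     # character length, concatenate, and build the dict once at the end.
--     def go(seg, base):
--         # returns (list of (offset-within-seg, absolute token index), total char length of seg)
--         if not seg:
--             return [], 0
--         if len(seg) == 1:
--             return [(0, base)], len(seg[0])
--         mid = len(seg) // 2
--         left, llen = go(seg[:mid], base)
--         right, rlen = go(seg[mid:], base + mid)
--         return left + [(off + llen, i) for off, i in right], llen + rlen
--
--     pairs, _ = go(doc, 0)
--     return dict(pairs)
-- ===== Notes on version B (the rewrite author's own statement) =====
-- stated objective: alternative
-- what changed: Replaces A's single left-to-right loop with a running offset accumulator by a divide-and-conquer recursion: each half's (relative offset, token index) pairs are computed independently, the right half is shifted by the left half's total character length, and the dict is built once from the concatenated pairs (left-to-right order preserves last-wins on duplicate offsets from empty tokens).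
import Mathlib
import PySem

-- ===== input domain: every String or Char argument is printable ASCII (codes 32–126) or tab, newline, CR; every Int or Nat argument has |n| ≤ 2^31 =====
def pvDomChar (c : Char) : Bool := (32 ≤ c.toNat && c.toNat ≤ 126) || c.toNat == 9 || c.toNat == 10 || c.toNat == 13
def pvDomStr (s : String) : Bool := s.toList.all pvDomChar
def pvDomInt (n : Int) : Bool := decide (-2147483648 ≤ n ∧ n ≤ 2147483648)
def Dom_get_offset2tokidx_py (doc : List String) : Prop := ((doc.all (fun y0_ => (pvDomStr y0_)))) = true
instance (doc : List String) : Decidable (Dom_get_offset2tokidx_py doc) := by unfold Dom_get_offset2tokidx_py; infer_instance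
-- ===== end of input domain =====

-- B replaces A's single accumulating loop by a divide-and-conquer recursion on the token
-- list (the right half's offsets shifted by the left half's character length), building
-- the dict once from the pair list at the end; objective: alternative.

-- ===== PORT A =====
-- one loop, state (mapping, idx, offset); returns the dict's items (insertion order)
def get_offset2tokidx_py (doc : List String) : List (Int × Int) :=
  (doc.foldl
    (fun (st : PySem.Dict Int Int × Int × Int) token =>
      (st.1.insert st.2.2 st.2.1, st.2.1 + 1, st.2.2 + PySem.Str.len token))
    (PySem.Dict.empty, 0, 0)).1.items

-- ===== PORT B =====
-- go(seg, base): the (relative offset, absolute token index) pairs of seg and seg's total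
-- character length; mid = len(seg)//2 on a nonneg length is Nat division (exact here)
def pvGo : List String → Int → List (Int × Int) × Int
  | [], _ => ([], 0)
  | [t], base => ([(0, base)], PySem.Str.len t)
  | t1 :: t2 :: ts, base =>
    let mid : Nat := (t1 :: t2 :: ts).length / 2
    let L := pvGo (PySem.List.slice (t1 :: t2 :: ts) none (some (mid : Int))) base
    let R := pvGo (PySem.List.slice (t1 :: t2 :: ts) (some (mid : Int)) none) (base + mid)
    (L.1 ++ R.1.map (fun p => (p.1 + L.2, p.2)), L.2 + R.2)
termination_by seg _ => seg.length
decreasing_by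
  · rw [PySem.List.slice_to_natCast]; simp only [List.length_take, List.length_cons]; omega
  · rw [PySem.List.slice_from_natCast]; simp only [List.length_drop, List.length_cons]; omega

-- dict(pairs): one left-to-right dict build from the pair list
def get_offset2tokidx_py_alt (doc : List String) : List (Int × Int) :=
  ((pvGo doc 0).1.foldl (fun (d : PySem.Dict Int Int) p => d.insert p.1 p.2)
    PySem.Dict.empty).items

-- ===== PRECONDITION & SPEC =====
def Spec_get_offset2tokidx_py (doc : List String) (out : List (Int × Int)) : Prop := out = get_offset2tokidx_py_alt doc
instance (doc : List String) (out : List (Int × Int)) : Decidable (Spec_get_offset2tokidx_py doc out) := by unfold Spec_get_offset2tokidx_py; infer_instance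

-- ===== CLAIM (what is proved, stated in full; the proofs are below) =====
def Claim_equal_get_offset2tokidx_py : Prop := ∀ (doc : List String), Dom_get_offset2tokidx_py doc → Spec_get_offset2tokidx_py doc (get_offset2tokidx_py doc)

-- ===== LEMMAS AND PROOFS =====

-- the (offset, index) pairs A inserts, starting at token index s and char offset off
def pvKvs : List String → Int → Int → List (Int × Int)
  | [], _, _ => []
  | t :: ts, s, off => (off, s) :: pvKvs ts (s + 1) (off + PySem.Str.len t)

-- total character length of a segment
def pvLen (seg : List String) : Int := (seg.map PySem.Str.len).sum

-- A's loop inserts exactly the pvKvs pair stream into the dict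
lemma pvA_fold (doc : List String) (d : PySem.Dict Int Int) (s off : Int) :
    (doc.foldl
      (fun (st : PySem.Dict Int Int × Int × Int) token =>
        (st.1.insert st.2.2 st.2.1, st.2.1 + 1, st.2.2 + PySem.Str.len token))
      (d, s, off)).1
    = (pvKvs doc s off).foldl (fun d p => d.insert p.1 p.2) d := by
  induction doc generalizing d s off with
  | nil => rfl
  | cons t ts ih =>
    simp only [List.foldl_cons, pvKvs]
    exact ih _ _ _

lemma pvKvs_shift (ts : List String) (s off c : Int) :
    (pvKvs ts s off).map (fun p => (p.1 + c, p.2)) = pvKvs ts s (off + c) := by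
  induction ts generalizing s off with
  | nil => rfl
  | cons t ts ih =>
    simp only [pvKvs, List.map_cons, ih]
    congr 2
    ring_nf

lemma pvKvs_append (l r : List String) (s off : Int) :
    pvKvs (l ++ r) s off = pvKvs l s off ++ pvKvs r (s + l.length) (off + pvLen l) := by
  induction l generalizing s off with
  | nil => simp [pvKvs, pvLen]
  | cons t ts ih =>
    simp only [List.cons_append, pvKvs, ih, pvLen, List.map_cons, List.sum_cons,
      List.length_cons]
    congr 3 <;> push_cast <;> ring

lemma pvLen_append (a b : List String) : pvLen (a ++ b) = pvLen a + pvLen b := by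
  simp [pvLen]

-- go computes the 0-based pair stream of its segment and the segment's total length
lemma pvGo_eq (seg : List String) (base : Int) :
    pvGo seg base = (pvKvs seg base 0, pvLen seg) := by
  induction seg, base using pvGo.induct with
  | case1 b => simp [pvGo, pvKvs, pvLen]
  | case2 t base => simp [pvGo, pvKvs, pvLen]
  | case3 t1 t2 ts base mid ihL ihR =>
    simp only [pvGo]
    simp only [PySem.List.slice_to_natCast, PySem.List.slice_from_natCast] at ihL ihR ⊢
    rw [ihL, ihR]
    have htd := List.take_append_drop ((t1 :: t2 :: ts).length / 2) (t1 :: t2 :: ts)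
    have hlen : (((t1 :: t2 :: ts).take ((t1 :: t2 :: ts).length / 2)).length : Int)
        = (((t1 :: t2 :: ts).length / 2 : Nat) : Int) := by
      rw [List.length_take]
      congr 1
      simp only [List.length_cons]
      omega
    refine Prod.ext ?_ ?_
    · simp only
      rw [pvKvs_shift]
      conv_rhs => rw [← htd, pvKvs_append]
      rw [hlen]
    · simp only
      conv_rhs => rw [← htd]
      exact (pvLen_append _ _).symm

-- ===== VERDICT (by name: the statement is the Claim_ definition above) =====
theorem get_offset2tokidx_py_spec : Claim_equal_get_offset2tokidx_py := by
  intro doc _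
  unfold Spec_get_offset2tokidx_py get_offset2tokidx_py get_offset2tokidx_py_alt
  rw [pvA_fold, pvGo_eq]
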